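-- pv_equiv track=rewrite | github.com/TimothyShi-kika/ai-test-gec | python/gnmt_model_wrapper/data_postprocess.py | merge_unk_new
-- ===== SOURCE A (Python) =====
-- def merge_unk_new(tokens):
--     unk_buffer = []
--     output_buffer = []
--     i = 0
--     while i < len(tokens):
--         if tokens[i] == '<u>':
--             i += 1
--             while i < len(tokens) and tokens[i] != '</u>':
--                 unk_buffer.append(tokens[i])
--                 i += 1
--             if i < len(tokens) and tokens[i] == '</u>':
--                 i += 1
--             output_buffer.append(''.join(unk_buffer))
--             unk_buffer = []
--         else:
--             output_buffer.append(tokens[i])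
--             i += 1
--     return ' '.join(output_buffer)
-- ===== SOURCE B (Python) =====
-- def merge_unk_new(tokens):
--     return ' '.join(_words(tokens))
--
--
-- def _words(tokens):
--     # recursive, slice-based: find the next '<u>' marker, emit everything before
--     # it verbatim, join the span up to the matching '</u>' (or to the end if
--     # unterminated), and recurse on the remainder
--     if '<u>' not in tokens:
--         return list(tokens)
--     k = tokens.index('<u>')
--     rest = tokens[k + 1:]
--     if '</u>' not in rest:
--         return tokens[:k] + [''.join(rest)]
--     j = rest.index('</u>')
--     return tokens[:k] + [''.join(rest[:j])] + _words(rest[j + 1:])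
-- ===== Notes on version B (the rewrite author's own statement) =====
-- stated objective: alternative
-- what changed: Replaces A's per-token index-driven while-loop state machine with a recursive, slice-based decomposition: find the next '<u>' with list.index, emit the prefix verbatim, join the slice up to the matching '</u>' (or to the end if unterminated), and recurse on the remainder.
import Mathlib
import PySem

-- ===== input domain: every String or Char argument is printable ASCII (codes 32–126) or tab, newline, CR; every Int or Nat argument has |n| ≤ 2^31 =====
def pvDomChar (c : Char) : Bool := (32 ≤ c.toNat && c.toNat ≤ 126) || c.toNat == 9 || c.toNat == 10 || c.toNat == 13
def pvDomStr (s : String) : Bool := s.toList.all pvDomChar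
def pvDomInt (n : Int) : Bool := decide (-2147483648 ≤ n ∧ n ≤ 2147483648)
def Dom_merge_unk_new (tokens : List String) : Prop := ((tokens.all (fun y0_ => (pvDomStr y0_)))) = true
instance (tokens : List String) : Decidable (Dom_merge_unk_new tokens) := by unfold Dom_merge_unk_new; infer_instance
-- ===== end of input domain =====

-- ===== PORT A =====
-- B replaces A's per-token index-driven while-loop state machine by a recursive
-- slice-based decomposition around list.index of the markers (objective: alternative).

-- inner while: collect tokens until '</u>' (skipping it); returns (unk_buffer, remaining tokens)
def pvA_inner : List String → List String × List String
  | [] => ([], [])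
  | t :: rest =>
    if t = "</u>" then ([], rest)
    else
      let (buf, r) := pvA_inner rest
      (t :: buf, r)

theorem pvA_inner_len (l : List String) : (pvA_inner l).2.length ≤ l.length := by
  induction l with
  | nil => simp [pvA_inner]
  | cons t rest ih =>
    simp only [pvA_inner]
    split
    · simp
    · simpa using Nat.le_succ_of_le ih

-- outer while over the remaining token list
def pvA_outer : List String → List String
  | [] => []
  | t :: rest =>
    if t = "<u>" then
      let p := pvA_inner rest
      PySem.Str.join "" p.1 :: pvA_outer p.2
    else t :: pvA_outer rest
termination_by l => l.length
decreasing_by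
  · exact Nat.lt_succ_of_le (pvA_inner_len rest)
  · simp

def merge_unk_new (tokens : List String) : String :=
  PySem.Str.join " " (pvA_outer tokens)

-- ===== PORT B =====
-- _words: find the next '<u>', emit the prefix verbatim, join the slice up to the
-- matching '</u>' (or to the end if unterminated), recurse on the remainder
def pvB_words (tokens : List String) : List String :=
  match hk : PySem.List.index? tokens "<u>" with
  | none => tokens
  | some k =>
    let rest := PySem.List.slice tokens (some ((k + 1 : Nat) : Int)) none
    match PySem.List.index? rest "</u>" with
    | none =>
      PySem.List.slice tokens none (some (k : Int)) ++ [PySem.Str.join "" rest]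
    | some j =>
      PySem.List.slice tokens none (some (k : Int)) ++
        [PySem.Str.join "" (PySem.List.slice rest none (some (j : Int)))] ++
        pvB_words (PySem.List.slice rest (some ((j + 1 : Nat) : Int)) none)
termination_by tokens.length
decreasing_by
  obtain ⟨hklt, -, -⟩ := PySem.List.getElem_of_index?_eq_some hk
  simp only [PySem.List.slice_from_natCast, List.length_drop]
  omega

def merge_unk_new_alt (tokens : List String) : String :=
  PySem.Str.join " " (pvB_words tokens)

-- ===== PRECONDITION & SPEC =====
def Spec_merge_unk_new (tokens : List String) (out : String) : Prop := out = merge_unk_new_alt tokens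
instance (tokens : List String) (out : String) : Decidable (Spec_merge_unk_new tokens out) := by unfold Spec_merge_unk_new; infer_instance

-- ===== CLAIM (what is proved, stated in full; the proofs are below) =====
def Claim_equal_merge_unk_new : Prop := ∀ (tokens : List String), Dom_merge_unk_new tokens → Spec_merge_unk_new tokens (merge_unk_new tokens)

-- ===== LEMMAS AND PROOFS =====

-- A's outer loop passes tokens other than '<u>' through verbatim
theorem pvA_outer_no_u (l : List String) (h : "<u>" ∉ l) : pvA_outer l = l := by
  induction l with
  | nil => simp [pvA_outer]
  | cons t rest ih =>
    rw [pvA_outer]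
    simp only [List.mem_cons, not_or] at h
    rw [if_neg (fun he => h.1 he.symm), ih h.2]

theorem pvA_outer_prefix (pre l : List String) (h : "<u>" ∉ pre) :
    pvA_outer (pre ++ l) = pre ++ pvA_outer l := by
  induction pre with
  | nil => simp
  | cons t rest ih =>
    simp only [List.mem_cons, not_or] at h
    rw [List.cons_append, pvA_outer, if_neg (fun he => h.1 he.symm), ih h.2, List.cons_append]

-- A's inner loop with no closing marker consumes everything
theorem pvA_inner_no_close (l : List String) (h : "</u>" ∉ l) : pvA_inner l = (l, []) := by
  induction l with
  | nil => simp [pvA_inner]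
  | cons t rest ih =>
    simp only [List.mem_cons, not_or] at h
    rw [pvA_inner, if_neg (fun he => h.1 he.symm), ih h.2]

-- A's inner loop stops at the first closing marker
theorem pvA_inner_split (p s : List String) (h : "</u>" ∉ p) :
    pvA_inner (p ++ "</u>" :: s) = (p, s) := by
  induction p with
  | nil => simp [pvA_inner]
  | cons t rest ih =>
    simp only [List.mem_cons, not_or] at h
    rw [List.cons_append, pvA_inner, if_neg (fun he => h.1 he.symm), ih h.2]

theorem pvAB_words (n : Nat) :
    ∀ l : List String, l.length = n → pvA_outer l = pvB_words l := by
  induction n using Nat.strong_induction_on with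
  | _ n ih =>
    intro l hl
    rw [pvB_words]
    split
    · next hk =>
      exact pvA_outer_no_u l ((PySem.List.index?_eq_none_iff _ _).1 hk)
    · next k hk =>
      obtain ⟨pre, suf, hsplit, hlen, hnot⟩ := (PySem.List.index?_eq_some_iff _ _ _).1 hk
      have hrest : PySem.List.slice l (some ((k + 1 : Nat) : Int)) none = suf := by
        rw [PySem.List.slice_from_natCast, hsplit, ← hlen, ← Nat.add_comm 1 pre.length,
          List.drop_append]
        simp
      have htake : PySem.List.slice l none (some (k : Int)) = pre := by
        rw [PySem.List.slice_to_natCast, hsplit, ← hlen, List.take_left]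
      simp only [hrest, htake]
      rw [hsplit, pvA_outer_prefix pre _ hnot, pvA_outer, if_pos rfl]
      split
      · next hj =>
        rw [pvA_inner_no_close suf ((PySem.List.index?_eq_none_iff _ _).1 hj)]
        simp [pvA_outer]
      · next j hj =>
        obtain ⟨p, s, hsp, hlp, hnp⟩ := (PySem.List.index?_eq_some_iff _ _ _).1 hj
        have hts : PySem.List.slice suf none (some (j : Int)) = p := by
          rw [PySem.List.slice_to_natCast, hsp, ← hlp, List.take_left]
        have hds : PySem.List.slice suf (some ((j + 1 : Nat) : Int)) none = s := by
          rw [PySem.List.slice_from_natCast, hsp, ← hlp, ← Nat.add_comm 1 p.length,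
            List.drop_append]
          simp
        have hslen : s.length < n := by
          subst hl; rw [hsplit, hsp]; simp; omega
        have hinner : pvA_inner suf = (p, s) := by
          rw [hsp]; exact pvA_inner_split p s hnp
        rw [hinner, hts, hds]
        simp [ih s.length hslen s rfl]

-- ===== VERDICT (by name: the statement is the Claim_ definition above) =====
theorem merge_unk_new_spec : Claim_equal_merge_unk_new := by
  intro tokens _
  unfold Spec_merge_unk_new merge_unk_new merge_unk_new_alt
  rw [pvAB_words tokens.length tokens rfl]
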